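-- pv_equiv track=rewrite | github.com/bonje-manza/mlbb-draft-command-center | draft_engine.py | _prioritize_reasons
-- ===== SOURCE A (Python) =====
-- def _is_enemy_specific_reason(reason_text):
--     lowered_reason = reason_text.lower()
--     return "enemy" in lowered_reason or " backline" in lowered_reason or "frontline " in lowered_reason
--
-- def _prioritize_reasons(reasons):
--     prioritized = []
--     seen = set()
--     enemy_specific_reason = next((reason for reason in reasons if _is_enemy_specific_reason(reason)), None)
--
--     if enemy_specific_reason:
--         prioritized.append(enemy_specific_reason)
--         seen.add(enemy_specific_reason)
--
--     for reason in reasons: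
--         if reason in seen:
--             continue
--         prioritized.append(reason)
--         seen.add(reason)
--
--     return prioritized
-- ===== SOURCE B (Python) =====
-- def _is_enemy_specific_reason(reason_text):
--     lowered_reason = reason_text.lower()
--     return "enemy" in lowered_reason or " backline" in lowered_reason or "frontline " in lowered_reason
--
-- def _prioritize_reasons(reasons):
--     unique = list(dict.fromkeys(reasons))
--     enemy = next((reason for reason in unique if _is_enemy_specific_reason(reason)), None)
--     if enemy is not None:
--         unique.remove(enemy)
--         unique.insert(0, enemy)
--     return unique
-- ===== Notes on version B (the rewrite author's own statement) =====
-- stated objective: simpler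
-- what changed: Dedup first via dict.fromkeys (no hand-maintained seen-set loop), then move the first enemy-specific reason to the front by remove/insert, instead of seeding a set with the enemy reason before a manual dedup pass.
import Mathlib
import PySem

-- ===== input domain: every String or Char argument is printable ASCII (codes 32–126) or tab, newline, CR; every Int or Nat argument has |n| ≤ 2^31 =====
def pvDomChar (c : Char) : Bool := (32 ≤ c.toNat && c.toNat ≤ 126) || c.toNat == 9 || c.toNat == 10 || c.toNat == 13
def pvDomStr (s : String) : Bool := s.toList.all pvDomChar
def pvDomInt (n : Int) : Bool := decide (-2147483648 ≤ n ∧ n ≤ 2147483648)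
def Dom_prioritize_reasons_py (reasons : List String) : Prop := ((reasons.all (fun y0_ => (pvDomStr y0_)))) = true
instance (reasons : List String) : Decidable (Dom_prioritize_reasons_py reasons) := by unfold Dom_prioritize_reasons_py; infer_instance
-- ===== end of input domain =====

-- B dedups first with dict.fromkeys, then moves the first enemy-specific reason to the front
-- by remove/insert — simpler than A's seeded seen-set dedup loop; return values proved equal.


-- ===== PORT A =====
-- helper _is_enemy_specific_reason (shared by both Pythons, transliterated once)
def pv_isEnemy (reason_text : String) : Bool :=
  let lowered_reason := PySem.Str.lower reason_text
  PySem.Str.isIn "enemy" lowered_reason || PySem.Str.isIn " backline" lowered_reason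
    || PySem.Str.isIn "frontline " lowered_reason

def prioritize_reasons_py (reasons : List String) : List String :=
  -- enemy_specific_reason = next((r for r in reasons if _is_enemy_specific_reason(r)), None)
  let enemy_specific_reason := reasons.find? pv_isEnemy
  -- if enemy_specific_reason:  (Python truthiness: None and "" are falsy)
  let init : List String × PySem.Set String :=
    match enemy_specific_reason with
    | some e => if e = "" then ([], PySem.Set.empty) else ([e], PySem.Set.add PySem.Set.empty e)
    | none => ([], PySem.Set.empty)
  -- for reason in reasons: if reason in seen: continue; prioritized.append(reason); seen.add(reason)
  let final := reasons.foldl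
    (fun st reason =>
      if PySem.Set.contains st.2 reason then st
      else (st.1 ++ [reason], PySem.Set.add st.2 reason)) init
  final.1

-- ===== PORT B =====
def prioritize_reasons_py_alt (reasons : List String) : List String :=
  -- unique = list(dict.fromkeys(reasons))
  let unique := PySem.List.dedup reasons
  -- enemy = next((r for r in unique if _is_enemy_specific_reason(r)), None)
  match unique.find? pv_isEnemy with
  | none => unique
  | some enemy =>
    -- unique.remove(enemy); unique.insert(0, enemy)
    match PySem.List.remove? unique enemy with
    | none => unique  -- unreachable totality guard: enemy was found in unique
    | some u => PySem.List.insert u 0 enemy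

-- ===== PRECONDITION & SPEC =====
def Spec_prioritize_reasons_py (reasons : List String) (out : List String) : Prop := out = prioritize_reasons_py_alt reasons
instance (reasons : List String) (out : List String) : Decidable (Spec_prioritize_reasons_py reasons out) := by unfold Spec_prioritize_reasons_py; infer_instance

-- ===== CLAIM (what is proved, stated in full; the proofs are below) =====
def Claim_equal_prioritize_reasons_py : Prop := ∀ (reasons : List String), Dom_prioritize_reasons_py reasons → Spec_prioritize_reasons_py reasons (prioritize_reasons_py reasons)

-- ===== LEMMAS AND PROOFS =====

-- A's loop keeps prioritized = seen (as lists) and computes Set.update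
theorem pv_loopA (l : List String) (s : PySem.Set String) :
    l.foldl (fun (st : List String × PySem.Set String) reason =>
      if PySem.Set.contains st.2 reason then st
      else (st.1 ++ [reason], PySem.Set.add st.2 reason)) (s, s)
    = (PySem.Set.update s l, PySem.Set.update s l) := by
  induction l generalizing s with
  | nil => simp [PySem.Set.update]
  | cons x l ih =>
    simp only [List.foldl_cons]
    by_cases hx : x ∈ s
    · rw [if_pos (by simpa [PySem.Set.contains_iff] using hx)]
      rw [ih s, PySem.Set.update_cons, PySem.Set.add_of_mem hx]
    · rw [if_neg (by simpa [PySem.Set.contains_iff] using hx)]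
      have : s ++ [x] = PySem.Set.add s x := (PySem.Set.add_of_not_mem hx).symm
      rw [this, ih (PySem.Set.add s x), PySem.Set.update_cons]

-- find? over a filter that only drops elements failing p
theorem pv_find_filter (p : String → Bool) (x : String) (hx : p x = false) :
    ∀ (S : List String), (S.filter (fun y => !(y == x))).find? p = S.find? p := by
  intro S
  induction S with
  | nil => rfl
  | cons y S ih =>
    by_cases hyx : y = x
    · subst hyx
      simp [hx, ih]
    · simp [List.find?_cons, hyx, ih]

-- find? commutes with ordered dedup
theorem pv_find_dedup (p : String → Bool) (l : List String) :
    (PySem.List.dedup l).find? p = l.find? p := by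
  rw [PySem.List.dedup_eq_ofList]
  induction l with
  | nil => rfl
  | cons x l ih =>
    rw [PySem.Set.ofList_cons]
    by_cases hp : p x = true
    · simp [hp]
    · simp only [Bool.not_eq_true] at hp
      simp only [List.find?_cons, hp]
      unfold PySem.Set.discard
      rw [pv_find_filter p x hp, ih]

theorem pv_discard_eq_erase (S : List String) (e : String) (hnd : S.Nodup) :
    PySem.Set.discard S e = S.erase e := by
  unfold PySem.Set.discard
  rw [List.Nodup.erase_eq_filter hnd]
  congr 1

theorem pv_update_singleton (e : String) (l : List String) :
    PySem.Set.update [e] l = e :: (PySem.Set.ofList l).discard e := by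
  have h1 : PySem.Set.ofList (e :: l) = PySem.Set.update (PySem.Set.ofList [e]) l := by
    rw [show (e :: l) = [e] ++ l from rfl, PySem.Set.ofList_append]
  have h2 : PySem.Set.ofList [e] = [e] := PySem.Set.ofList_eq_self_of_nodup [e] (List.nodup_singleton e)
  rw [h2] at h1
  rw [← h1, PySem.Set.ofList_cons]

theorem pv_isEnemy_empty : pv_isEnemy "" = false := by decide

-- ===== VERDICT (by name: the statement is the Claim_ definition above) =====
theorem prioritize_reasons_py_spec : Claim_equal_prioritize_reasons_py := by
  intro reasons _
  unfold Spec_prioritize_reasons_py prioritize_reasons_py prioritize_reasons_py_alt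
  cases hfind : reasons.find? pv_isEnemy with
  | none =>
    simp only [pv_find_dedup pv_isEnemy reasons, hfind]
    have hinit : (([], PySem.Set.empty) : List String × PySem.Set String)
        = (PySem.Set.empty, PySem.Set.empty) := rfl
    rw [hinit, pv_loopA reasons PySem.Set.empty]
    rw [PySem.List.dedup_eq_ofList, ← PySem.Set.update_nil_left]
    rfl
  | some e =>
    have hpe : pv_isEnemy e = true := List.find?_some hfind
    have hne : e ≠ "" := by
      intro h; rw [h] at hpe; exact absurd hpe (by rw [pv_isEnemy_empty]; simp)
    have hmem : e ∈ reasons := List.mem_of_find?_eq_some hfind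
    have hmemd : e ∈ PySem.List.dedup reasons := by
      rw [PySem.List.dedup_eq_ofList, PySem.Set.mem_ofList]; exact hmem
    simp only [pv_find_dedup pv_isEnemy reasons, hfind]
    rw [PySem.List.remove?_eq_some_erase _ e hmemd]
    simp only [if_neg hne]
    have hadd : PySem.Set.add PySem.Set.empty e = [e] := rfl
    rw [hadd, pv_loopA reasons [e], pv_update_singleton e reasons]
    rw [PySem.List.insert_zero]
    rw [PySem.List.dedup_eq_ofList,
        pv_discard_eq_erase _ e (PySem.Set.nodup_ofList reasons)]
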